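-- pv_equiv track=rewrite | github.com/alexa-infra/py-imagineer | huffman.py | check_huffman_table
-- ===== SOURCE A (Python) =====
-- def rev_range(n):
--     return range(n-1, -1, -1)
--
-- def rev_dict(d):
--     return {v: k for k, v in d.items()}
--
-- def byte_to_bits(byte, length=8):
--     return tuple(1 if byte & (1 << i) else 0 for i in rev_range(length))
--
-- def check_huffman_table(codes):
--     code = 0
--     revcodes = rev_dict(codes)
--     codeslist = list(codes.values())
--     codeslist.sort(key=len)
--     p = 0
--     for v in codeslist:
--         l = len(v)
--         if l != p:
--             code = code << 1
--             p = l
--         bits = byte_to_bits(code, l)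
--         if bits not in revcodes:
--             return False
--         code += 1
--     return True
-- ===== SOURCE B (Python) =====
-- def rev_range(n):
--     return range(n-1, -1, -1)
--
-- def byte_to_bits(byte, length=8):
--     return tuple(1 if byte & (1 << i) else 0 for i in rev_range(length))
--
-- def check_huffman_table(codes):
--     revcodes = {v: k for k, v in codes.items()}
--     counts = {}
--     for v in codes.values():
--         counts[len(v)] = counts.get(len(v), 0) + 1
--     code = 0
--     for length in sorted(counts):
--         code = code << 1
--         for _ in range(counts[length]):
--             if byte_to_bits(code, length) not in revcodes:
--                 return False
--             code += 1
--     return True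
-- ===== Notes on version B (the rewrite author's own statement) =====
-- stated objective: alternative
-- what changed: B replaces A's single pass over the length-sorted value list (with the length-change test on each element) by a histogram of code lengths driving nested count loops over the sorted distinct lengths, keeping the reversed-dict membership test and the shift-and-increment canonical-code generation.
import Mathlib
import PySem

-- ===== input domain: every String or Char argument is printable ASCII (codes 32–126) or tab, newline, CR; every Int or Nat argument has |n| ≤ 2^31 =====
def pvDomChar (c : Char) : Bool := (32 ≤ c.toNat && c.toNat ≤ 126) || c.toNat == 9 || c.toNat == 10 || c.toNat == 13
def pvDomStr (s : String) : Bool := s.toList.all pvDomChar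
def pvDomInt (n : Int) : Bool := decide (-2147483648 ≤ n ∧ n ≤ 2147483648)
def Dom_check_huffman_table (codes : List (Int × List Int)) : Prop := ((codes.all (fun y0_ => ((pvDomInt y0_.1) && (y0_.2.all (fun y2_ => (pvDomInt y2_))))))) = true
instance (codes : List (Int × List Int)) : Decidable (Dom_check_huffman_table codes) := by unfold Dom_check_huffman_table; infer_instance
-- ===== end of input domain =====

-- B replaces A's single pass over the length-sorted value list by a code-length histogram
-- driving nested count loops over the sorted distinct lengths (objective: alternative
-- decomposition, same cost).

-- ===== PORT A =====
def rev_range (n : Int) : List Int := PySem.List.pyRange (n - 1) (-1) (-1)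

-- (1 << i) is (1 : Int) <<< i.toNat: exact, since every i produced by rev_range is ≥ 0
def byte_to_bits (byte : Int) (length : Int) : List Int :=
  (rev_range length).map (fun i => if PySem.Int.band byte ((1 : Int) <<< i.toNat) ≠ 0 then (1 : Int) else 0)

def rev_dict (d : PySem.Dict Int (List Int)) : PySem.Dict (List Int) Int :=
  PySem.Dict.ofList (d.items.map (fun p => (p.2, p.1)))

def chtLoop (revcodes : PySem.Dict (List Int) Int) : List (List Int) → Int → Int → Bool
  | [], _code, _p => true
  | v :: rest, code, p =>
    let l : Int := (v.length : Int)
    let cp : Int × Int := if l ≠ p then (code <<< (1 : Nat), l) else (code, p)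
    let bits := byte_to_bits cp.1 l
    if revcodes.contains bits then chtLoop revcodes rest (cp.1 + 1) cp.2 else false

def check_huffman_table (codes : List (Int × List Int)) : Bool :=
  let d := PySem.Dict.ofList codes
  let revcodes := rev_dict d
  let codeslist := PySem.List.sorted d.values (fun v => (v.length : Int)) false
  chtLoop revcodes codeslist 0 0

-- ===== PORT B =====
def altInner (revcodes : PySem.Dict (List Int) Int) (length : Int) : Nat → Int → Option Int
  | 0, code => some code
  | n + 1, code =>
    if revcodes.contains (byte_to_bits code length) then altInner revcodes length n (code + 1)
    else none

-- counts[length] is ported as getD … 0 with .toNat; exact, since the key is always present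
-- with a positive count
def altOuter (revcodes : PySem.Dict (List Int) Int) (counts : PySem.Dict Int Int) :
    List Int → Int → Bool
  | [], _code => true
  | length :: rest, code =>
    match altInner revcodes length (counts.getD length 0).toNat (code <<< (1 : Nat)) with
    | some code' => altOuter revcodes counts rest code'
    | none => false

def check_huffman_table_alt (codes : List (Int × List Int)) : Bool :=
  let d := PySem.Dict.ofList codes
  let revcodes : PySem.Dict (List Int) Int := PySem.Dict.ofList (d.items.map (fun p => (p.2, p.1)))
  let counts := d.values.foldl (fun c v => c.modify ((v.length : Int)) 0 (· + 1)) PySem.Dict.empty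
  altOuter revcodes counts (PySem.List.sorted counts.keys (fun x => x) false) 0

-- ===== PRECONDITION & SPEC =====
def Spec_check_huffman_table (codes : List (Int × List Int)) (out : Bool) : Prop := out = check_huffman_table_alt codes
instance (codes : List (Int × List Int)) (out : Bool) : Decidable (Spec_check_huffman_table codes out) := by unfold Spec_check_huffman_table; infer_instance

-- ===== CLAIM (what is proved, stated in full; the proofs are below) =====
def Claim_equal_check_huffman_table : Prop := ∀ (codes : List (Int × List Int)), Dom_check_huffman_table codes → Spec_check_huffman_table codes (check_huffman_table codes)

-- ===== LEMMAS AND PROOFS =====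

-- A's loop with each value replaced by its length (the loop body only reads len(v))
def lenLoop (revcodes : PySem.Dict (List Int) Int) : List Int → Int → Int → Bool
  | [], _code, _p => true
  | l :: rest, code, p =>
    let cp : Int × Int := if l ≠ p then (code <<< (1 : Nat), l) else (code, p)
    if revcodes.contains (byte_to_bits cp.1 l) then lenLoop revcodes rest (cp.1 + 1) cp.2 else false

theorem chtLoop_eq_lenLoop (rc : PySem.Dict (List Int) Int) :
    ∀ (vs : List (List Int)) (code p : Int),
      chtLoop rc vs code p = lenLoop rc (vs.map (fun v => (v.length : Int))) code p := by
  intro vs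
  induction vs with
  | nil => intro code p; rfl
  | cons v rest ih =>
    intro code p
    simp only [chtLoop, lenLoop, List.map_cons]
    split <;> split <;> first | exact ih _ _ | rfl

theorem lenLoop_replicate (rc : PySem.Dict (List Int) Int) (k : Int) :
    ∀ (n : Nat) (tl : List Int) (code : Int),
      lenLoop rc (List.replicate n k ++ tl) code k =
        match altInner rc k n code with
        | some c => lenLoop rc tl c k
        | none => false := by
  intro n
  induction n with
  | zero => intro tl code; rfl
  | succ m ih =>
    intro tl code
    simp only [List.replicate_succ, List.cons_append, lenLoop, altInner, ne_eq,
      not_true_eq_false, if_false]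
    split <;> simp_all

theorem lenLoop_expand (rc : PySem.Dict (List Int) Int) (counts : PySem.Dict Int Int) :
    ∀ (ks : List Int) (code p : Int), ks.Pairwise (· < ·) →
      (∀ k ∈ ks, 1 ≤ (counts.getD k 0).toNat) →
      (∀ k, ks.head? = some k → p = k → code = 0) →
      lenLoop rc (ks.flatMap (fun k => List.replicate (counts.getD k 0).toNat k)) code p =
        altOuter rc counts ks code := by
  intro ks
  induction ks with
  | nil => intro code p _ _ _; rfl
  | cons k rest ih =>
    intro code p hpw hcnt hhead
    obtain ⟨m, hm⟩ : ∃ m, (counts.getD k 0).toNat = m + 1 := by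
      have := hcnt k (by simp); exact ⟨(counts.getD k 0).toNat - 1, by omega⟩
    have key : ∀ T : List Int, lenLoop rc (k :: T) code p =
        if rc.contains (byte_to_bits (code <<< (1 : Nat)) k) then
          lenLoop rc T ((code <<< (1 : Nat)) + 1) k else false := by
      intro T
      by_cases h : k = p
      · have hc0 : code = 0 := hhead k rfl h.symm
        subst hc0; subst h
        have h01 : (0 : Int) <<< (1 : Nat) = 0 := by decide
        simp [lenLoop, h01]
      · simp [lenLoop, h]
    rw [List.flatMap_cons, hm, List.replicate_succ, List.cons_append, key]
    simp only [altOuter, hm, altInner]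
    split
    · rw [lenLoop_replicate]
      have hpw' := (List.pairwise_cons.mp hpw).2
      have hlt := (List.pairwise_cons.mp hpw).1
      cases haI : altInner rc k m ((code <<< (1 : Nat)) + 1) with
      | none => rfl
      | some c =>
        refine ih c k hpw' (fun k' hk' => hcnt k' (by simp [hk'])) ?_
        intro k' hk' heq
        have hk'mem : k' ∈ rest := by
          cases rest with
          | nil => simp at hk'
          | cons a t => simp at hk'; exact hk' ▸ List.mem_cons_self ..
        exact absurd (heq ▸ hlt k' hk'mem) (lt_irrefl k)
    · rfl

theorem count_flatMap_replicate (c : Int → Nat) :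
    ∀ (ks : List Int), ks.Nodup → ∀ a : Int,
      (ks.flatMap (fun k => List.replicate (c k) k)).count a = if a ∈ ks then c a else 0 := by
  intro ks
  induction ks with
  | nil => intro _ a; simp
  | cons k rest ih =>
    intro hnd a
    simp only [List.flatMap_cons, List.count_append, List.count_replicate,
      ih (hnd.of_cons), List.mem_cons]
    by_cases h : a = k
    · subst h
      have : a ∉ rest := (List.nodup_cons.mp hnd).1
      simp [this]
    · simp [h, Ne.symm h]

theorem pairwise_le_flatMap_replicate (c : Int → Nat) :
    ∀ (ks : List Int), ks.Pairwise (· < ·) →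
      (ks.flatMap (fun k => List.replicate (c k) k)).Pairwise (· ≤ ·) := by
  intro ks
  induction ks with
  | nil => intro _; simp
  | cons k rest ih =>
    intro hpw
    obtain ⟨hlt, hpw'⟩ := List.pairwise_cons.mp hpw
    simp only [List.flatMap_cons]
    refine List.pairwise_append.mpr ⟨?_, ih hpw', ?_⟩
    · exact List.pairwise_replicate.mpr (Or.inr le_rfl)
    · intro x hx y hy
      have hxk : x = k := List.eq_of_mem_replicate hx
      obtain ⟨k', hk', hy'⟩ := List.mem_flatMap.mp hy
      have : y = k' := List.eq_of_mem_replicate hy'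
      exact hxk ▸ this ▸ le_of_lt (hlt k' hk')

theorem check_huffman_table_spec : Claim_equal_check_huffman_table := by
  intro codes _dom
  show check_huffman_table codes = check_huffman_table_alt codes
  simp only [check_huffman_table, check_huffman_table_alt, rev_dict]
  set d := PySem.Dict.ofList codes with hd
  set vals := d.values with hvals
  set L : List Int := vals.map (fun v => (v.length : Int)) with hL
  set rc := PySem.Dict.ofList (d.items.map (fun p => (p.2, p.1))) with hrc
  have hcounts : vals.foldl (fun c v => c.modify ((v.length : Int)) 0 (· + 1)) PySem.Dict.empty
      = PySem.Dict.counter L := by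
    simp only [hL, PySem.Dict.counter_eq_foldl, List.foldl_map]
  rw [hcounts, PySem.Dict.keys_counter]
  set ks := PySem.List.sorted (PySem.Set.ofList L) (fun x => x) false with hks
  have hpwlt : ks.Pairwise (· < ·) := by
    rw [hks]; exact PySem.List.sorted_ofList_pairwise_lt L
  have hmemks : ∀ k, k ∈ ks ↔ k ∈ L := by
    intro k; rw [hks, PySem.List.mem_sorted, PySem.Set.mem_ofList]
  have hcnt : ∀ k ∈ ks, ((PySem.Dict.counter L).getD k 0).toNat = L.count k := by
    intro k _; rw [PySem.Dict.getD_counter]; exact Int.toNat_natCast _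
  -- the sorted value list, viewed through len, is the sorted length list
  have hA : (PySem.List.sorted vals (fun v => (v.length : Int)) false).map
      (fun v => (v.length : Int)) = PySem.List.sorted L (fun x => x) false := by
    refine (PySem.List.sorted_id_eq_of_perm_of_pairwise _ _ ?_ ?_).symm
    · exact (PySem.List.sorted_perm _ _ _).map _
    · exact PySem.List.sorted_map_key_pairwise (xs := vals) (key := fun v => (v.length : Int))
  -- the sorted length list is the histogram expansion over the sorted distinct lengths
  have hExp : PySem.List.sorted L (fun x => x) false =
      ks.flatMap (fun k => List.replicate ((PySem.Dict.counter L).getD k 0).toNat k) := by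
    have hflat : ks.flatMap (fun k => List.replicate ((PySem.Dict.counter L).getD k 0).toNat k)
        = ks.flatMap (fun k => List.replicate (L.count k) k) := by
      simp only [List.flatMap_def]
      exact congrArg List.flatten (List.map_congr_left (fun k hk => by rw [hcnt k hk]))
    rw [hflat]
    refine PySem.List.sorted_id_eq_of_perm_of_pairwise _ _ ?_ ?_
    · refine List.perm_iff_count.mpr (fun a => ?_)
      rw [count_flatMap_replicate _ ks (hpwlt.imp ne_of_lt) a]
      by_cases h : a ∈ ks
      · simp [h]
      · simp [h, List.count_eq_zero.mpr (fun ha => h ((hmemks a).mpr ha))]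
    · exact pairwise_le_flatMap_replicate _ ks hpwlt
  rw [chtLoop_eq_lenLoop, hA, hExp]
  exact lenLoop_expand rc (PySem.Dict.counter L) ks 0 0 hpwlt
    (fun k hk => by rw [hcnt k hk]; exact List.count_pos_iff.mpr ((hmemks k).mp hk))
    (fun _ _ _ => rfl)
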